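-- pv_equiv track=rewrite | github.com/rusdes/IS | amortized_analysis.py | amortized_potential_dynamic
-- ===== SOURCE A (Python) =====
-- import math
--
-- def amortized_potential_dynamic(func):
--     # potential func = 2n - m
--     # n = current number of elements
--     # m = length of array
--     n = 0
--     m = 0
--
--     actual_cost = 0
--
--     for i in range(len(func)):
--         if func[i] == "append":
--             if n > 0 and m == n and math.log2(n).is_integer():
--                 m *= 2
--                 actual_cost += n
--             if n == 0:
--                 m = 1
--             n += 1
--             actual_cost += 1
--
--     return int(math.ceil((actual_cost + (2*n - m) - 0) / len(func)))
-- ===== SOURCE B (Python) =====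
-- import math
--
-- def amortized_potential_dynamic(func):
--     # Closed form: after k appends the simulation's numerator
--     # actual_cost + (2n - m) collapses to 3k - 1 (0 when k == 0).
--     k = func.count("append")
--     numerator = 3 * k - 1 if k else 0
--     return int(math.ceil(numerator / len(func)))
-- ===== Notes on version B (the rewrite author's own statement) =====
-- stated objective: simpler
-- what changed: Replaces the per-element dynamic-array simulation (doubling m, accumulating actual_cost, potential 2n-m) with a single count of "append" and the closed form ceil((3k-1)/len) (0 numerator when k=0).
import Mathlib
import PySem

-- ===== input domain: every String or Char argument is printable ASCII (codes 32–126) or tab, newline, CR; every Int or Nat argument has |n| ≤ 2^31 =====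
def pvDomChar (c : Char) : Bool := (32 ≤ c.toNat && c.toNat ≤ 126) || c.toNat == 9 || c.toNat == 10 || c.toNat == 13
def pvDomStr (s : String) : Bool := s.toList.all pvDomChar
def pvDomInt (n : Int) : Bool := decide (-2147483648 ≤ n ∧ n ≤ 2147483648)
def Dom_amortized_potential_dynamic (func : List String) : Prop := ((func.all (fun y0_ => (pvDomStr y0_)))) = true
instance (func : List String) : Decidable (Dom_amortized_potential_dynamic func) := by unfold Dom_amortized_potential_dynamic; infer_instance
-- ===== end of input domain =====

-- B replaces A's per-element dynamic-array simulation with a count of "append" and the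
-- closed-form numerator 3k-1 (0 when k = 0); same ceil division by len(func).


-- ===== PORT A =====
-- math.log2(n).is_integer() for n >= 1: true iff n is a power of two (exact at the
-- magnitudes reachable here, where float log2 is exact on powers of two)
def isPow2 (n : Nat) : Bool :=
  if n = 0 then false
  else if n = 1 then true
  else n % 2 == 0 && isPow2 (n / 2)
decreasing_by exact Nat.div_lt_self (by omega) (by omega)

def pyLog2IsInt (n : Int) : Bool := isPow2 n.toNat

-- loop body of A's for-loop over func, state (n, m, actual_cost)
def stepA : (Int × Int × Int) → String → (Int × Int × Int)
  | (n, m, c), x =>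
    if x == "append" then
      let p := if n > 0 && m == n && pyLog2IsInt n then (m * 2, c + n) else (m, c)
      let m2 := if n == 0 then (1 : Int) else p.1
      (n + 1, m2, p.2 + 1)
    else (n, m, c)

def amortized_potential_dynamic (func : List String) : Int :=
  let s := func.foldl stepA (0, 0, 0)
  -- int(math.ceil(x / len(func))): exact ceiling division, -((-x) // len) (float division exact here)
  Neg.neg (PySem.Int.floordiv (Neg.neg (s.2.2 + (2 * s.1 - s.2.1) - 0)) (func.length : Int))

-- ===== PORT B =====
def amortized_potential_dynamic_alt (func : List String) : Int :=
  let k : Int := (PySem.List.count func "append" : Int)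
  let numerator : Int := if k == 0 then 0 else 3 * k - 1
  -- int(math.ceil(numerator / len(func))): exact ceiling division, -((-x) // len)
  Neg.neg (PySem.Int.floordiv (Neg.neg numerator) (func.length : Int))

-- ===== PRECONDITION & SPEC =====
-- Pre_ excludes only the empty list, on which A raises ZeroDivisionError (len(func) == 0); B raises there too.
def Pre_amortized_potential_dynamic (func : List String) : Prop := func ≠ []
instance (func : List String) : Decidable (Pre_amortized_potential_dynamic func) := by unfold Pre_amortized_potential_dynamic; infer_instance
def pvWitness_amortized_potential_dynamic : List String := ["append", "pop"]
def Spec_amortized_potential_dynamic (func : List String) (out : Int) : Prop := out = amortized_potential_dynamic_alt func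
instance (func : List String) (out : Int) : Decidable (Spec_amortized_potential_dynamic func out) := by unfold Spec_amortized_potential_dynamic; infer_instance

-- ===== CLAIM (what is proved, stated in full; the proofs are below) =====
def Claim_equal_amortized_potential_dynamic : Prop := ∀ (func : List String), Dom_amortized_potential_dynamic func → Pre_amortized_potential_dynamic func → Spec_amortized_potential_dynamic func (amortized_potential_dynamic func)

-- ===== LEMMAS AND PROOFS =====

-- invariant of A's loop after processing a prefix containing k "append"s:
-- n = k, and for k ≥ 1 m is the least power of two ≥ k and actual_cost = k + m - 1
def InvA (k : Nat) (s : Int × Int × Int) : Prop :=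
  s.1 = (k : Int) ∧
  ((k = 0 ∧ s.2.1 = 0 ∧ s.2.2 = 0) ∨
   (1 ≤ k ∧ (∃ j : Nat, s.2.1 = ((2 ^ j : Nat) : Int)) ∧ s.1 ≤ s.2.1 ∧ s.2.1 < 2 * s.1 ∧
    s.2.2 = s.1 + s.2.1 - 1))

theorem isPow2_two_pow (j : Nat) : isPow2 (2 ^ j) = true := by
  induction j with
  | zero => simp [isPow2]
  | succ j ih =>
    rw [isPow2]
    have h1 : (1 : Nat) ≤ 2 ^ j := Nat.one_le_two_pow
    have h2 : 2 ^ (j + 1) = 2 ^ j * 2 := pow_succ 2 j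
    have hmod : 2 ^ (j + 1) % 2 = 0 := by omega
    have hdiv : 2 ^ (j + 1) / 2 = 2 ^ j := by omega
    rw [if_neg (by omega), if_neg (by omega), hmod, hdiv, ih]
    rfl

theorem stepA_inv (k : Nat) (s : Int × Int × Int) (x : String) (h : InvA k s) :
    InvA (k + (if x = "append" then 1 else 0)) (stepA s x) := by
  obtain ⟨n, m, c⟩ := s
  obtain ⟨hn, hrest⟩ := h
  simp only at hn
  by_cases hx : x = "append"
  · subst hx
    simp only [stepA, beq_self_eq_true, if_true]
    rcases hrest with ⟨hk0, hm, hc⟩ | ⟨hk1, ⟨j, hj⟩, hle, hlt, hc⟩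
    · -- first append: n = 0
      simp only at hm hc
      subst hk0
      simp only [Nat.cast_zero] at hn
      subst hn hm hc
      refine ⟨by norm_num, Or.inr ⟨le_refl 1, ⟨0, by norm_num⟩, by norm_num, by norm_num, by norm_num⟩⟩
    · simp only at hj hle hlt hc
      have hk1' : (1 : Int) ≤ (k : Int) := by exact_mod_cast hk1
      have hnpos : (0 : Int) < n := by omega
      have hn0 : (n == (0 : Int)) = false := by simp; omega
      by_cases hmn : m = n
      · -- doubling branch fires: m = n is a power of two
        have hpow : pyLog2IsInt n = true := by
          unfold pyLog2IsInt
          have : n.toNat = 2 ^ j := by omega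
          rw [this]; exact isPow2_two_pow j
        have hcond : (decide (n > 0) && (m == n) && pyLog2IsInt n) = true := by
          simp only [Bool.and_eq_true, decide_eq_true_eq, beq_iff_eq]
          exact ⟨⟨hnpos, hmn⟩, hpow⟩
        rw [if_pos hcond]
        simp only [hn0, Bool.false_eq_true, if_false]
        have hj' : m = (2 : Int) ^ j := by push_cast at hj; exact hj
        refine ⟨by push_cast; omega, Or.inr ⟨by omega, ⟨j + 1, ?_⟩,
          by simp only; omega, by simp only; omega, by simp only; omega⟩⟩
        show m * 2 = ((2 ^ (j + 1) : Nat) : Int)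
        push_cast
        rw [pow_succ, ← hj']
      · -- no doubling: n < m
        have hcond : ¬ (decide (n > 0) && (m == n) && pyLog2IsInt n) = true := by
          intro hc
          simp only [Bool.and_eq_true, decide_eq_true_eq, beq_iff_eq] at hc
          exact hmn hc.1.2
        rw [if_neg hcond]
        simp only [hn0, Bool.false_eq_true, if_false]
        have hlt' : n < m := lt_of_le_of_ne hle (fun h => hmn h.symm)
        exact ⟨by push_cast; omega, Or.inr ⟨by omega, ⟨j, by simp only; omega⟩,
          by simp only; omega, by simp only; omega, by simp only; omega⟩⟩
  · have hb : (x == "append") = false := by simp [hx]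
    simp only [stepA, hb, Bool.false_eq_true, if_false, hx]
    exact ⟨by simpa using hn, by simpa using hrest⟩

theorem foldl_inv (l : List String) (s : Int × Int × Int) (k : Nat) (h : InvA k s) :
    InvA (k + l.count "append") (l.foldl stepA s) := by
  induction l generalizing s k with
  | nil => simpa using h
  | cons x xs ih =>
    by_cases hx : x = "append"
    · subst hx
      have h2 := ih (stepA s "append") (k + 1) (by simpa using stepA_inv k s "append" h)
      simp only [List.foldl_cons, List.count_cons_self]
      have heq : k + (xs.count "append" + 1) = k + 1 + xs.count "append" := by omega
      rw [heq]; exact h2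
    · have h2 := ih (stepA s x) k (by simpa [hx] using stepA_inv k s x h)
      have hb : (x == "append") = false := by simp [hx]
      simp only [List.foldl_cons, List.count_cons, hb, Bool.false_eq_true, if_false, Nat.add_zero]
      exact h2

-- ===== VERDICT (by name: the statement is the Claim_ definition above) =====
theorem amortized_potential_dynamic_spec : Claim_equal_amortized_potential_dynamic := by
  intro func _ _
  unfold Spec_amortized_potential_dynamic amortized_potential_dynamic amortized_potential_dynamic_alt
  have hinv := foldl_inv func ((0 : Int), (0 : Int), (0 : Int)) 0 ⟨rfl, Or.inl ⟨rfl, rfl, rfl⟩⟩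
  rw [Nat.zero_add] at hinv
  have hcnt : PySem.List.count func "append" = func.count "append" := PySem.List.count_eq func "append"
  simp only [hcnt]
  generalize hF : func.foldl stepA ((0 : Int), (0 : Int), (0 : Int)) = s at hinv ⊢
  generalize hK : func.count "append" = k at hinv ⊢
  obtain ⟨n, m, c⟩ := s
  obtain ⟨hn, hrest⟩ := hinv
  simp only at hn
  have hnum : c + (2 * n - m) - 0 = (if ((k : Int) == 0) = true then 0 else 3 * (k : Int) - 1) := by
    rcases hrest with ⟨hk0, hm, hc⟩ | ⟨hk1, _, _, _, hc⟩
    · simp only at hm hc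
      subst hk0; simp only [Nat.cast_zero, beq_self_eq_true, if_true]
      simp only [Nat.cast_zero] at hn
      omega
    · simp only at hc
      have : ((k : Int) == 0) = false := by simp; omega
      rw [this]
      simp only [Bool.false_eq_true, if_false]
      omega
  simp only [hnum]
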